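-- pv_equiv track=rewrite | github.com/artemtar/data-analysis | A*for_data_optimization.py | findMutationDistance
-- ===== SOURCE A (Python) =====
-- import heapq
--
-- def findMutationDistance(start, end, bank):
--     if start == end:
--         return 0
--     if start != end and len(bank) == 0:
--         return -1
--     if len(start) != len(end):
--         return -1
--
--     mutations_all = bank
--
--     # checks difference between two strings, I need 1 for path
--     mutation_distance = lambda l1, l2: len(start) - len([1 for a, b in zip(l1, l2) if a == b])
--
--     if start not in bank:
--         mutations_all.insert(0, start)
--
--     distances_form_start = [-1 for i in mutations_all]
--     canditate_for_mutation = []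
--     for i in range(len(mutations_all)):
--         if mutations_all[i] == start:
--             distances_form_start[i] = 0
--             heapq.heappush(canditate_for_mutation, (0, [start, i]))  # nodes to visit requeres: (string, position in the all_strings array)
--             break
--
--     while len(canditate_for_mutation) != 0:
--         _, next = heapq.heappop(canditate_for_mutation)
--         for z in range(len(mutations_all)):
--             if mutation_distance(mutations_all[z], next[0]) == 1 and distances_form_start[z] == -1:
--                 dist = distances_form_start[next[1]] + 1
--                 distances_form_start[z] = dist  # updates distance to start
--                 check = mutations_all[z]
--                 if check == end:
--                     return dist  # eventually end is here, otherwise will return -1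
--                 genetic_dist = mutation_distance(check, end)
--                 heapq.heappush(canditate_for_mutation, (genetic_dist, [check, z]))
--     return -1
-- ===== SOURCE B (Python) =====
-- def findMutationDistance(start, end, bank):
--     if start == end:
--         return 0
--     if start != end and len(bank) == 0:
--         return -1
--     if len(start) != len(end):
--         return -1
--
--     nodes = bank
--     if start not in nodes:
--         nodes.insert(0, start)
--     L = len(start)
--
--     def matches(u, v):
--         return sum(1 for a, b in zip(u, v) if a == b)
--
--     dist = [-1] * len(nodes)
--     s = nodes.index(start)
--     dist[s] = 0
--     pending = [(0, start, s)]
--     while pending: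
--         item = min(pending)
--         pending.remove(item)
--         _, cur, ci = item
--         new = [z for z in range(len(nodes))
--                if dist[z] == -1 and matches(nodes[z], cur) == L - 1]
--         d = dist[ci] + 1
--         for z in new:
--             dist[z] = d
--         if any(nodes[z] == end for z in new):
--             return d
--         pending.extend((L - matches(nodes[z], end), nodes[z], z) for z in new)
--     return -1
-- ===== Notes on version B (the rewrite author's own statement) =====
-- stated objective: simpler
-- what changed: B keeps A's greedy best-first discipline (the popped tuple is always the least pending one, which the proof shows is all that matters) but drops heapq entirely: the pending list is plain, the next node is picked with min()+remove(), and the whole frontier of a popped node is computed as one batch comprehension with a single any() end-test instead of A's interleaved per-index early-return scan with heap pushes.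
import Mathlib
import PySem

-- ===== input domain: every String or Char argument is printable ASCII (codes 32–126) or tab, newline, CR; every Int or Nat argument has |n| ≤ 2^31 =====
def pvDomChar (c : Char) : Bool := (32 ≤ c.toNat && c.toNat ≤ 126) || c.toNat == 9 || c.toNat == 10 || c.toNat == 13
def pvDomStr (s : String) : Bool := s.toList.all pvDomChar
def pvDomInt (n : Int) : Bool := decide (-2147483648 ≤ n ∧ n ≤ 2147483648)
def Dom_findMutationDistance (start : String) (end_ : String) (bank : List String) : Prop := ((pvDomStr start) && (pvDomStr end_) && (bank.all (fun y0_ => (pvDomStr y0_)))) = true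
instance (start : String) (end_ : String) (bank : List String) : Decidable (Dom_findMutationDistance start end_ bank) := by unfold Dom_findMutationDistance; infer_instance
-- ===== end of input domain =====

-- B replaces A's heapq priority queue by min-selection from a plain pending list and expands the
-- frontier in one batch (objective: simpler, no speed claim).  Equivalence is about the RETURN
-- value; both A and B insert `start` in place at the front of the caller's `bank` when absent
-- (the same observable mutation).

-- ===== shared helpers (used verbatim by both ports) =====
-- len([1 for a, b in zip(l1, l2) if a == b])  (exact: zip truncates to the shorter list)
def pvMatches (u v : List Char) : Int := (((u.zip v).filter (fun p => p.1 == p.2)).length : Int)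

-- Python's `<` on the strings (lexicographic on code points; exact for all Unicode strings)
def pvStrLt : List Char → List Char → Bool
  | [], [] => false
  | [], _ :: _ => true
  | _ :: _, [] => false
  | a :: as, b :: bs => if a < b then true else if b < a then false else pvStrLt as bs

-- Python's `<` on the queued tuples (int, str-or-[str], int): lexicographic (exact)
def pvItemLt (a b : Int × String × Int) : Bool :=
  if a.1 < b.1 then true
  else if b.1 < a.1 then false
  else if pvStrLt a.2.1.toList b.2.1.toList then true
  else if pvStrLt b.2.1.toList a.2.1.toList then false
  else decide (a.2.2 < b.2.2)

-- ===== PORT A =====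
-- heapq.heappush, modeled by insertion into an ordered list.  Exact for A's queue: heappop
-- returns the least element of the heap, and A's queued tuples are pairwise distinct (each bank
-- index is pushed at most once), so pop order is exactly ascending order of the queued tuples.
def pvInsort (x : Int × String × Int) : List (Int × String × Int) → List (Int × String × Int)
  | [] => [x]
  | y :: ys => if pvItemLt x y then x :: y :: ys else y :: pvInsort x ys

-- A's inner `for z in range(len(mutations_all))` loop, with its early `return dist`
-- (first component `some d`) and its heap pushes
def pvScanA (nodes : List String) (L : Nat) (end_ : String) (cur : String) (ci : Int) :
    List Nat → List Int → List (Int × String × Int) →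
    Option Int × List Int × List (Int × String × Int)
  | [], dist, pending => (none, dist, pending)
  | z :: zt, dist, pending =>
    if ((L : Int) - pvMatches (nodes.getD z "").toList cur.toList == 1)
        && (dist.getD z (-1) == -1) then
      let d := PySem.List.pyGetD dist ci (-1) + 1
      let dist' := dist.set z d
      if nodes.getD z "" == end_ then (some d, dist', pending)
      else pvScanA nodes L end_ cur ci zt dist'
        (pvInsort ((L : Int) - pvMatches (nodes.getD z "").toList end_.toList,
                   nodes.getD z "", (z : Int)) pending)
    else pvScanA nodes L end_ cur ci zt dist pending

-- A's `while len(canditate_for_mutation) != 0` loop.  Fuel makes the loop total; each iteration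
-- pops one queued tuple and each bank index is pushed at most once, so `nodes.length + 1` fuel
-- is never exhausted on a real run.
def pvLoopA (nodes : List String) (L : Nat) (end_ : String) :
    Nat → List Int → List (Int × String × Int) → Int
  | 0, _, _ => -1
  | fuel + 1, dist, pending =>
    match pending with
    | [] => -1
    | (_, cur, ci) :: rest =>
      match pvScanA nodes L end_ cur ci (List.range nodes.length) dist rest with
      | (some d, _, _) => d
      | (none, dist', pending') => pvLoopA nodes L end_ fuel dist' pending'

def findMutationDistance (start : String) (end_ : String) (bank : List String) : Int :=
  if start == end_ then 0
  else if (!(start == end_)) && (bank.length == 0) then -1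
  else if !(start.toList.length == end_.toList.length) then -1
  else
    let nodes := if bank.contains start then bank else start :: bank
    let L := start.toList.length
    let dist0 := List.replicate nodes.length (-1 : Int)
    -- A's `for i in range(...): if mutations_all[i] == start: ...; break` = first index of start
    match PySem.List.index? nodes start with
    | none => -1  -- no match: the heap stays empty and the while loop returns -1
    | some i => pvLoopA nodes L end_ (nodes.length + 1) (dist0.set i 0) [((0 : Int), start, (i : Int))]

-- ===== PORT B =====
-- `min(pending)`: fold keeping the first strictly smaller element (Python's min)
def pvMinSel (m : Int × String × Int) (l : List (Int × String × Int)) : Int × String × Int :=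
  l.foldl (fun acc x => if pvItemLt x acc then x else acc) m

-- Source B's `while pending` loop: pop the minimum, expand the whole frontier batch, then test `end`
def pvLoopB (nodes : List String) (L : Nat) (end_ : String) :
    Nat → List Int → List (Int × String × Int) → Int
  | 0, _, _ => -1
  | fuel + 1, dist, pending =>
    match pending with
    | [] => -1
    | p0 :: ps =>
      let m := pvMinSel p0 ps
      let rest := (PySem.List.remove? (p0 :: ps) m).getD []  -- pending.remove(item); m ∈ pending
      let ns := (List.range nodes.length).filter
        (fun z => (dist.getD z (-1) == -1)
          && (pvMatches (nodes.getD z "").toList m.2.1.toList == (L : Int) - 1))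
      let d := PySem.List.pyGetD dist m.2.2 (-1) + 1
      let dist' := ns.foldl (fun dd z => dd.set z d) dist
      if ns.any (fun z => nodes.getD z "" == end_) then d
      else pvLoopB nodes L end_ fuel dist'
        (rest ++ ns.map (fun z =>
          ((L : Int) - pvMatches (nodes.getD z "").toList end_.toList, nodes.getD z "", (z : Int))))

def findMutationDistance_alt (start : String) (end_ : String) (bank : List String) : Int :=
  if start == end_ then 0
  else if (!(start == end_)) && (bank.length == 0) then -1
  else if !(start.toList.length == end_.toList.length) then -1
  else
    let nodes := if bank.contains start then bank else start :: bank
    let L := start.toList.length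
    match PySem.List.index? nodes start with
    | none => -1  -- unreachable (start ∈ nodes); Source B's nodes.index(start) cannot fail
    | some s => pvLoopB nodes L end_ (nodes.length + 1)
        ((List.replicate nodes.length (-1 : Int)).set s 0) [((0 : Int), start, (s : Int))]

-- ===== PRECONDITION & SPEC =====
def Spec_findMutationDistance (start : String) (end_ : String) (bank : List String) (out : Int) : Prop := out = findMutationDistance_alt start end_ bank
instance (start : String) (end_ : String) (bank : List String) (out : Int) : Decidable (Spec_findMutationDistance start end_ bank out) := by unfold Spec_findMutationDistance; infer_instance

-- ===== CLAIM (what is proved, stated in full; the proofs are below) =====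
def Claim_equal_findMutationDistance : Prop := ∀ (start : String) (end_ : String) (bank : List String), Dom_findMutationDistance start end_ bank → Spec_findMutationDistance start end_ bank (findMutationDistance start end_ bank)

-- ===== LEMMAS AND PROOFS =====

-- ---- the tuple order is a strict linear order ----
lemma pvStrLt_irrefl : ∀ u, pvStrLt u u = false := by
  intro u; induction u with
  | nil => rfl
  | cons a as ih => simp [pvStrLt, ih]

lemma pvStrLt_antisymm : ∀ u v, pvStrLt u v = false → pvStrLt v u = false → u = v := by
  intro u; induction u with
  | nil =>
    intro v h1 _
    cases v with
    | nil => rfl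
    | cons b bs => simp [pvStrLt] at h1
  | cons a as ih =>
    intro v h1 h2
    cases v with
    | nil => simp [pvStrLt] at h2
    | cons b bs =>
      simp only [pvStrLt] at h1 h2
      rcases lt_trichotomy a b with h | h | h
      · simp [h] at h1
      · subst h
        simp [lt_irrefl] at h1 h2
        exact congrArg (a :: ·) (ih bs h1 h2)
      · simp [h, lt_asymm h] at h2

lemma pvStrLt_trans : ∀ u v w, pvStrLt u v = true → pvStrLt v w = true → pvStrLt u w = true := by
  intro u; induction u with
  | nil =>
    intro v w h1 h2
    cases v with
    | nil => exact h2
    | cons b bs =>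
      cases w with
      | nil => simp [pvStrLt] at h2
      | cons c cs => rfl
  | cons a as ih =>
    intro v w h1 h2
    cases v with
    | nil => simp [pvStrLt] at h1
    | cons b bs =>
      cases w with
      | nil => simp [pvStrLt] at h2
      | cons c cs =>
        simp only [pvStrLt] at h1 h2 ⊢
        rcases lt_trichotomy a b with hab | hab | hab
        · rcases lt_trichotomy b c with hbc | hbc | hbc
          · simp [lt_trans hab hbc]
          · subst hbc; simp [hab]
          · simp [hbc, lt_asymm hbc] at h2
        · subst hab
          rcases lt_trichotomy a c with hac | hac | hac
          · simp [hac]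
          · subst hac
            simp [lt_irrefl] at h1 h2 ⊢
            exact ih bs cs h1 h2
          · simp [hac, lt_asymm hac] at h2
        · simp [hab, lt_asymm hab] at h1

lemma pvItemLt_iff (a b : Int × String × Int) : pvItemLt a b = true ↔
    a.1 < b.1 ∨ (a.1 = b.1 ∧ (pvStrLt a.2.1.toList b.2.1.toList = true ∨
      (a.2.1.toList = b.2.1.toList ∧ a.2.2 < b.2.2))) := by
  unfold pvItemLt
  split_ifs with g1 g2 g3 g4
  · simp [g1]
  · simp only [Bool.false_eq_true, false_iff]
    intro h
    rcases h with h | ⟨he, _⟩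
    · exact g1 h
    · omega
  · have he : a.1 = b.1 := by omega
    simp [he, g3, lt_irrefl]
  · have he : a.1 = b.1 := by omega
    have hne : a.2.1.toList ≠ b.2.1.toList := by
      intro hq
      rw [hq, pvStrLt_irrefl] at g4
      exact Bool.noConfusion g4
    simp [he, g3, g4, hne, lt_irrefl]
  · have he : a.1 = b.1 := by omega
    have heq : a.2.1.toList = b.2.1.toList := pvStrLt_antisymm _ _ (by simpa using g3) (by simpa using g4)
    simp [he, heq, pvStrLt_irrefl]

lemma pvItemLt_irrefl (a : Int × String × Int) : pvItemLt a a = false := by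
  cases h : pvItemLt a a with
  | false => rfl
  | true =>
    rw [pvItemLt_iff] at h
    rcases h with h | ⟨_, h | ⟨_, h⟩⟩
    · omega
    · rw [pvStrLt_irrefl] at h; exact Bool.noConfusion h
    · omega

lemma pvItemLt_trans (a b c : Int × String × Int)
    (h1 : pvItemLt a b = true) (h2 : pvItemLt b c = true) : pvItemLt a c = true := by
  rw [pvItemLt_iff] at h1 h2 ⊢
  rcases h1 with h1 | ⟨e1, s1⟩
  · rcases h2 with h2 | ⟨e2, _⟩
    · left; omega
    · left; omega
  · rcases h2 with h2 | ⟨e2, s2⟩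
    · left; omega
    · right
      refine ⟨by omega, ?_⟩
      rcases s1 with s1 | ⟨q1, i1⟩
      · rcases s2 with s2 | ⟨q2, i2⟩
        · exact Or.inl (pvStrLt_trans _ _ _ s1 s2)
        · rw [q2] at s1; exact Or.inl s1
      · rcases s2 with s2 | ⟨q2, i2⟩
        · rw [q1]; exact Or.inl s2
        · exact Or.inr ⟨q1.trans q2, by omega⟩

lemma pvItemLt_antisymm (a b : Int × String × Int)
    (h1 : pvItemLt a b = false) (h2 : pvItemLt b a = false) : a = b := by
  have n1 : ¬ (pvItemLt a b = true) := by simp [h1]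
  have n2 : ¬ (pvItemLt b a = true) := by simp [h2]
  rw [pvItemLt_iff] at n1 n2
  push_neg at n1 n2
  have he : a.1 = b.1 := by omega
  have c1 := n1.2 he
  have c2 := n2.2 he.symm
  have hs : a.2.1.toList = b.2.1.toList :=
    pvStrLt_antisymm _ _ (by simpa using c1.1) (by simpa using c2.1)
  have hi : a.2.2 = b.2.2 := by
    have := c1.2 hs
    have := c2.2 hs.symm
    omega
  exact Prod.ext he (Prod.ext (String.toList_inj.mp hs) hi)

lemma pvItemLt_asymm (a b : Int × String × Int) (h : pvItemLt a b = true) :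
    pvItemLt b a = false := by
  cases hh : pvItemLt b a with
  | false => rfl
  | true =>
    have := pvItemLt_trans a b a h hh
    rw [pvItemLt_irrefl] at this
    exact Bool.noConfusion this

-- "x ≤ y" on queued tuples
def pvLe (x y : Int × String × Int) : Prop := pvItemLt y x = false

lemma pvLe_of_lt_of_le {x y z : Int × String × Int}
    (h1 : pvItemLt x y = true) (h2 : pvLe y z) : pvLe x z := by
  unfold pvLe at h2 ⊢
  cases hh : pvItemLt z x with
  | false => rfl
  | true =>
    have := pvItemLt_trans z x y hh h1
    rw [this] at h2
    exact Bool.noConfusion h2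

lemma pvLe_trans {x y z : Int × String × Int} (h1 : pvLe x y) (h2 : pvLe y z) : pvLe x z := by
  unfold pvLe at h1 h2 ⊢
  cases hh : pvItemLt z x with
  | false => rfl
  | true =>
    cases hyx : pvItemLt y x with
    | true => rw [hyx] at h1; exact Bool.noConfusion h1
    | false =>
      cases hxy : pvItemLt x y with
      | true =>
        have := pvItemLt_trans z x y hh hxy
        rw [this] at h2; exact Bool.noConfusion h2
      | false =>
        have := pvItemLt_antisymm x y hxy hyx
        subst this
        rw [hh] at h2; exact Bool.noConfusion h2

-- ---- pvInsort: permutation and order preservation ----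
lemma pvInsort_perm (x : Int × String × Int) (l : List (Int × String × Int)) :
    (pvInsort x l).Perm (x :: l) := by
  induction l with
  | nil => exact List.Perm.refl _
  | cons y ys ih =>
    simp only [pvInsort]
    split_ifs
    · exact List.Perm.refl _
    · exact (ih.cons y).trans (List.Perm.swap x y ys)

lemma pvInsort_sorted (x : Int × String × Int) (l : List (Int × String × Int))
    (h : l.Pairwise pvLe) : (pvInsort x l).Pairwise pvLe := by
  induction l with
  | nil => simp [pvInsort]
  | cons y ys ih =>
    rcases List.pairwise_cons.mp h with ⟨hy, hys⟩
    simp only [pvInsort]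
    split_ifs with hx
    · refine List.pairwise_cons.mpr ⟨?_, h⟩
      intro z hz
      rcases List.mem_cons.mp hz with hz | hz
      · rw [hz]; exact pvItemLt_asymm x y hx
      · exact pvLe_of_lt_of_le hx (hy z hz)
    · refine List.pairwise_cons.mpr ⟨?_, ih hys⟩
      intro z hz
      rcases List.mem_cons.mp ((pvInsort_perm x ys).mem_iff.mp hz) with hz' | hz'
      · rw [hz']; exact eq_false_of_ne_true hx
      · exact hy z hz'

-- the sequence of pushes A performs during one scan
def pvInsortAll (ms p : List (Int × String × Int)) : List (Int × String × Int) :=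
  ms.foldl (fun acc x => pvInsort x acc) p

lemma pvInsortAll_perm (ms p : List (Int × String × Int)) :
    (pvInsortAll ms p).Perm (ms ++ p) := by
  induction ms generalizing p with
  | nil => simp [pvInsortAll]
  | cons m mt ih =>
    simp only [pvInsortAll, List.foldl_cons]
    have h1 : (pvInsortAll mt (pvInsort m p)).Perm (mt ++ pvInsort m p) := ih _
    have h2 : (mt ++ pvInsort m p).Perm (mt ++ (m :: p)) :=
      List.Perm.append_left mt (pvInsort_perm m p)
    exact (h1.trans h2).trans List.perm_middle

lemma pvInsortAll_sorted (ms p : List (Int × String × Int)) (h : p.Pairwise pvLe) :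
    (pvInsortAll ms p).Pairwise pvLe := by
  induction ms generalizing p with
  | nil => exact h
  | cons m mt ih => exact ih _ (pvInsort_sorted m p h)

-- ---- min-selection: value and lower-bound facts ----
lemma pvMinSel_cons (m y : Int × String × Int) (ys : List (Int × String × Int)) :
    pvMinSel m (y :: ys) = pvMinSel (if pvItemLt y m then y else m) ys := rfl

lemma pvMinSel_mem (m : Int × String × Int) (l : List (Int × String × Int)) :
    pvMinSel m l ∈ m :: l := by
  induction l generalizing m with
  | nil => simp [pvMinSel]
  | cons x xs ih =>
    rw [pvMinSel_cons]
    have h := ih (if pvItemLt x m then x else m)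
    rcases List.mem_cons.mp h with h | h
    · rw [h]; split_ifs <;> simp
    · simp [List.mem_cons, h]

lemma pvMinSel_le (m : Int × String × Int) (l : List (Int × String × Int)) :
    ∀ x ∈ m :: l, pvLe (pvMinSel m l) x := by
  induction l generalizing m with
  | nil =>
    intro x hx
    rcases List.mem_cons.mp hx with hx | hx
    · rw [hx]; exact pvItemLt_irrefl _
    · cases hx
  | cons y ys ih =>
    intro x hx
    rw [pvMinSel_cons]
    by_cases hy : pvItemLt y m = true
    · rw [if_pos hy]
      have hself : pvLe (pvMinSel y ys) y := ih y y (by simp)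
      rcases List.mem_cons.mp hx with hx | hx
      · rw [hx]; exact pvLe_trans hself (pvItemLt_asymm y m hy)
      · exact ih y x hx
    · rw [if_neg hy]
      have hself : pvLe (pvMinSel m ys) m := ih m m (by simp)
      have hmy : pvLe m y := eq_false_of_ne_true hy
      rcases List.mem_cons.mp hx with hx | hx
      · rw [hx]; exact hself
      · rcases List.mem_cons.mp hx with hx | hx
        · rw [hx]; exact pvLe_trans hself hmy
        · exact ih m x (List.mem_cons_of_mem _ hx)

-- ---- getD/set/foldl facts ----
lemma pvGetD_set_ne (l : List Int) (m n : Nat) (a d : Int) (h : m ≠ n) :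
    (l.set m a).getD n d = l.getD n d := by
  simp [List.getD, List.getElem?_set, h]

lemma pvGetD_set_self (l : List Int) (n : Nat) (a d : Int) (h : n < l.length) :
    (l.set n a).getD n d = a := by
  simp [List.getD, List.getElem?_set, h]

lemma pvFoldlSet_length (ns : List Nat) (dist : List Int) (d : Int) :
    (ns.foldl (fun dd z => dd.set z d) dist).length = dist.length := by
  induction ns generalizing dist with
  | nil => rfl
  | cons z zt ih => simp [List.foldl_cons, ih, List.length_set]

lemma pvFoldlSet_getD_not_mem (ns : List Nat) (dist : List Int) (d dflt : Int) (n : Nat)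
    (h : n ∉ ns) : (ns.foldl (fun dd z => dd.set z d) dist).getD n dflt = dist.getD n dflt := by
  induction ns generalizing dist with
  | nil => rfl
  | cons z zt ih =>
    simp only [List.foldl_cons]
    rw [ih _ (fun hm => h (List.mem_cons_of_mem _ hm))]
    exact pvGetD_set_ne _ _ _ _ _ (fun hq => h (hq ▸ List.mem_cons_self))

lemma pvFoldlSet_getD_mem (ns : List Nat) (dist : List Int) (d : Int) (n : Nat)
    (h : n ∈ ns) (hn : n < dist.length) :
    (ns.foldl (fun dd z => dd.set z d) dist).getD n (-1) = d := by
  induction ns generalizing dist with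
  | nil => cases h
  | cons z zt ih =>
    simp only [List.foldl_cons]
    by_cases hz : n ∈ zt
    · exact ih _ hz (by simpa using hn)
    · have hzn : z = n := by
        rcases List.mem_cons.mp h with h | h
        · exact h.symm
        · exact absurd h hz
      rw [pvFoldlSet_getD_not_mem _ _ _ _ _ hz, hzn, pvGetD_set_self _ _ _ _ hn]

lemma pvFoldlSet_ge (ns : List Nat) (dist : List Int) (d : Int)
    (hd : -1 ≤ d) (hall : ∀ v ∈ dist, -1 ≤ v) :
    ∀ v ∈ ns.foldl (fun dd z => dd.set z d) dist, -1 ≤ v := by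
  induction ns generalizing dist with
  | nil => exact hall
  | cons z zt ih =>
    simp only [List.foldl_cons]
    refine ih _ ?_
    intro v hv
    rcases List.mem_or_eq_of_mem_set hv with hv | hv
    · exact hall v hv
    · rw [hv]; exact hd

-- ---- characterization of one scan of A's inner loop ----

-- the condition A tests at index z (literally its port's boolean)
def pvAccept (nodes : List String) (L : Nat) (cur : String) (dist : List Int) (z : Nat) : Bool :=
  ((L : Int) - pvMatches (nodes.getD z "").toList cur.toList == 1) && (dist.getD z (-1) == -1)

-- the tuple pushed for a newly discovered index z
def pvMkItem (nodes : List String) (L : Nat) (end_ : String) (z : Nat) : Int × String × Int :=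
  ((L : Int) - pvMatches (nodes.getD z "").toList end_.toList, nodes.getD z "", (z : Int))

lemma pvScanA_none (nodes : List String) (L : Nat) (end_ cur : String) (cn : Nat) :
    ∀ (zs : List Nat) (dist : List Int) (pending : List (Int × String × Int)),
    zs.Nodup → dist.getD cn (-1) ≠ -1 →
    ((zs.filter (pvAccept nodes L cur dist)).any (fun z => nodes.getD z "" == end_)) = false →
    pvScanA nodes L end_ cur (cn : Int) zs dist pending =
      (none,
       (zs.filter (pvAccept nodes L cur dist)).foldl
         (fun dd z => dd.set z (dist.getD cn (-1) + 1)) dist,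
       pvInsortAll ((zs.filter (pvAccept nodes L cur dist)).map (pvMkItem nodes L end_)) pending) := by
  intro zs
  induction zs with
  | nil => intro dist pending _ _ _; rfl
  | cons z zt ih =>
    intro dist pending hnd hc hno
    rcases List.nodup_cons.mp hnd with ⟨hz, hndt⟩
    rw [pvScanA]
    cases hacc : pvAccept nodes L cur dist z with
    | false =>
      rw [if_neg (by simpa [pvAccept] using hacc)]
      rw [List.filter_cons_of_neg (by simpa using hacc)] at hno ⊢
      exact ih dist pending hndt hc hno
    | true =>
      rw [if_pos (by simpa [pvAccept] using hacc)]
      rw [List.filter_cons_of_pos (by simpa using hacc)] at hno ⊢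
      have hend : (nodes.getD z "" == end_) = false := by
        cases hq : (nodes.getD z "" == end_) with
        | false => rfl
        | true => rw [List.any_cons, hq] at hno; exact absurd hno (by simp)
      rw [hend]
      simp only [Bool.false_eq_true, if_false]
      -- the index z A just set is not cn
      have hzm : dist.getD z (-1) = -1 := by
        have := hacc
        simp only [pvAccept, Bool.and_eq_true] at this
        simpa using this.2
      have hzcn : z ≠ cn := fun hq => hc (hq ▸ hzm)
      have hget : PySem.List.pyGetD dist (cn : Int) (-1) = dist.getD cn (-1) :=
        PySem.List.pyGetD_natCast dist cn (-1)
      set d := dist.getD cn (-1) + 1 with hd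
      have hcn' : (dist.set z (PySem.List.pyGetD dist (cn : Int) (-1) + 1)).getD cn (-1) = dist.getD cn (-1) :=
        pvGetD_set_ne _ _ _ _ _ hzcn
      have hfilter : zt.filter (pvAccept nodes L cur (dist.set z (PySem.List.pyGetD dist (cn : Int) (-1) + 1)))
          = zt.filter (pvAccept nodes L cur dist) := by
        apply List.filter_congr
        intro y hy
        have hyz : z ≠ y := fun hq => hz (hq ▸ hy)
        simp only [pvAccept]
        rw [pvGetD_set_ne _ _ _ _ _ hyz]
      have hno' : ((zt.filter (pvAccept nodes L cur dist)).any fun z => nodes.getD z "" == end_) = false := by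
        rw [List.any_cons, hend] at hno
        simpa using hno
      rw [ih _ _ hndt (by rw [hcn']; exact hc) (by rw [hfilter]; exact hno')]
      rw [hfilter, hcn', hget]
      rfl

lemma pvScanA_some (nodes : List String) (L : Nat) (end_ cur : String) (cn : Nat) :
    ∀ (zs : List Nat) (dist : List Int) (pending : List (Int × String × Int)),
    zs.Nodup → dist.getD cn (-1) ≠ -1 →
    ((zs.filter (pvAccept nodes L cur dist)).any (fun z => nodes.getD z "" == end_)) = true →
    (pvScanA nodes L end_ cur (cn : Int) zs dist pending).1 = some (dist.getD cn (-1) + 1) := by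
  intro zs
  induction zs with
  | nil => intro dist pending _ _ hyes; simp at hyes
  | cons z zt ih =>
    intro dist pending hnd hc hyes
    rcases List.nodup_cons.mp hnd with ⟨hz, hndt⟩
    rw [pvScanA]
    have hget : PySem.List.pyGetD dist (cn : Int) (-1) = dist.getD cn (-1) :=
      PySem.List.pyGetD_natCast dist cn (-1)
    cases hacc : pvAccept nodes L cur dist z with
    | false =>
      rw [if_neg (by simpa [pvAccept] using hacc)]
      rw [List.filter_cons_of_neg (by simpa using hacc)] at hyes
      exact ih dist pending hndt hc hyes
    | true =>
      rw [if_pos (by simpa [pvAccept] using hacc)]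
      have hzm : dist.getD z (-1) = -1 := by
        have := hacc
        simp only [pvAccept, Bool.and_eq_true] at this
        simpa using this.2
      have hzcn : z ≠ cn := fun hq => hc (hq ▸ hzm)
      cases hend : (nodes.getD z "" == end_) with
      | true =>
        simp only [show (true = true) = True from by simp, if_true]
        rw [hget]
      | false =>
        simp only [Bool.false_eq_true, if_false]
        rw [List.filter_cons_of_pos (by simpa using hacc), List.any_cons, hend] at hyes
        have hyes' : (zt.filter (pvAccept nodes L cur dist)).any (fun z => nodes.getD z "" == end_) = true := by
          simpa using hyes
        have hcn' : (dist.set z (PySem.List.pyGetD dist (cn : Int) (-1) + 1)).getD cn (-1) = dist.getD cn (-1) :=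
          pvGetD_set_ne _ _ _ _ _ hzcn
        have hfilter : zt.filter (pvAccept nodes L cur (dist.set z (PySem.List.pyGetD dist (cn : Int) (-1) + 1)))
            = zt.filter (pvAccept nodes L cur dist) := by
          apply List.filter_congr
          intro y hy
          have hyz : z ≠ y := fun hq => hz (hq ▸ hy)
          simp only [pvAccept]
          rw [pvGetD_set_ne _ _ _ _ _ hyz]
        rw [ih _ _ hndt (by rw [hcn']; exact hc) (by rw [hfilter]; exact hyes'), hcn']

-- ---- the main bisimulation: A's heap loop = B's min-selection loop ----
lemma pvLoop_eq (nodes : List String) (L : Nat) (end_ : String) :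
    ∀ (fuel : Nat) (dist : List Int) (pa pb : List (Int × String × Int)),
    dist.length = nodes.length →
    (∀ v ∈ dist, -1 ≤ v) →
    pa.Pairwise pvLe →
    pa.Perm pb →
    (∀ it ∈ pa, ∃ n : Nat, it.2.2 = (n : Int) ∧ n < nodes.length ∧ 0 ≤ dist.getD n (-1)) →
    pvLoopA nodes L end_ fuel dist pa = pvLoopB nodes L end_ fuel dist pb := by
  intro fuel
  induction fuel with
  | zero => intro dist pa pb _ _ _ _ _; rfl
  | succ fuel ih =>
    intro dist pa pb hlen hge hsort hperm hitems
    cases pa with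
    | nil =>
      have hpb : pb = [] := hperm.symm.eq_nil
      subst hpb; rfl
    | cons h t =>
      cases pb with
      | nil => exact absurd hperm.eq_nil (by simp)
      | cons p0 ps =>
        -- B's min(pending) is exactly A's heap head
        have hmin_mem : pvMinSel p0 ps ∈ h :: t := hperm.symm.mem_iff.mp (pvMinSel_mem p0 ps)
        have hhead_le : ∀ x ∈ h :: t, pvLe h x := by
          intro x hx
          rcases List.mem_cons.mp hx with hx | hx
          · rw [hx]; exact pvItemLt_irrefl _
          · exact (List.pairwise_cons.mp hsort).1 x hx
        have hmin_le : pvLe (pvMinSel p0 ps) h :=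
          pvMinSel_le p0 ps h (hperm.mem_iff.mp List.mem_cons_self)
        have hm : pvMinSel p0 ps = h :=
          pvItemLt_antisymm _ _ (hhead_le _ hmin_mem) hmin_le
        obtain ⟨cn, hcn, hcnlt, hcnge⟩ := hitems h List.mem_cons_self
        obtain ⟨h1, cur, ci⟩ := h
        simp only at hcn
        -- unfold one step of both loops
        rw [pvLoopA, pvLoopB]
        simp only [hm]
        have hrest : (PySem.List.remove? (p0 :: ps) (h1, cur, ci)).getD [] = (p0 :: ps).erase (h1, cur, ci) := by
          rw [PySem.List.remove?_eq_some_erase _ _ (hperm.mem_iff.mp List.mem_cons_self)]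
          rfl
        have hrest_perm : t.Perm ((p0 :: ps).erase (h1, cur, ci)) := by
          have := List.Perm.erase (l₁ := (h1, cur, ci) :: t) (h1, cur, ci) hperm
          rwa [List.erase_cons_head] at this
        -- B's frontier filter is A's accept filter
        have hfilter_eq :
            (List.range nodes.length).filter
              (fun z => (dist.getD z (-1) == -1)
                && (pvMatches (nodes.getD z "").toList cur.toList == (L : Int) - 1))
            = (List.range nodes.length).filter (pvAccept nodes L cur dist) := by
          apply List.filter_congr
          intro z _
          simp only [pvAccept, List.getD]
          by_cases h1' : pvMatches ((nodes[z]?.getD "").toList) cur.toList = (L : Int) - 1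
          · have h2' : (L : Int) - pvMatches ((nodes[z]?.getD "").toList) cur.toList = 1 := by omega
            simp [beq_iff_eq, h1', h2']
          · have h2' : ¬ ((L : Int) - pvMatches ((nodes[z]?.getD "").toList) cur.toList = 1) := by omega
            have e1 : (pvMatches ((nodes[z]?.getD "").toList) cur.toList == (L : Int) - 1) = false :=
              beq_eq_false_iff_ne.mpr h1'
            have e2 : ((L : Int) - pvMatches ((nodes[z]?.getD "").toList) cur.toList == 1) = false :=
              beq_eq_false_iff_ne.mpr h2'
            rw [e1, e2, Bool.and_false, Bool.false_and]
        have hc : dist.getD cn (-1) ≠ -1 := by omega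
        have hget : PySem.List.pyGetD dist ci (-1) = dist.getD cn (-1) := by
          rw [hcn]; exact PySem.List.pyGetD_natCast dist cn (-1)
        set ns := (List.range nodes.length).filter (pvAccept nodes L cur dist) with hns
        rw [hfilter_eq]
        cases hany : ns.any (fun z => nodes.getD z "" == end_) with
        | true =>
          have hscan := pvScanA_some nodes L end_ cur cn (List.range nodes.length) dist t
            (List.nodup_range) hc (by rw [← hns]; exact hany)
          rw [← hcn] at hscan
          rcases hq : pvScanA nodes L end_ cur ci (List.range nodes.length) dist t with ⟨r1, r2, r3⟩
          rw [hq] at hscan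
          simp only at hscan
          rw [hscan]
          simp only [if_true, hget]
        | false =>
          have hscan := pvScanA_none nodes L end_ cur cn (List.range nodes.length) dist t
            (List.nodup_range) hc (by rw [← hns]; exact hany)
          rw [← hcn] at hscan
          rw [hscan, ← hns]
          simp only [Bool.false_eq_true, if_false]
          -- apply the induction hypothesis to the new state
          set d := dist.getD cn (-1) + 1 with hd
          have hd1 : 0 ≤ d := by omega
          set dist1 := ns.foldl (fun dd z => dd.set z d) dist with hdist1
          set ms := ns.map (pvMkItem nodes L end_) with hms
          have hfold_eq : ns.foldl (fun dd z => dd.set z (PySem.List.pyGetD dist ci (-1) + 1)) dist = dist1 := by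
            rw [hget]
          rw [hfold_eq]
          have hmap_eq : ns.map (fun z =>
              ((L : Int) - pvMatches (nodes.getD z "").toList end_.toList, nodes.getD z "", (z : Int))) = ms := rfl
          rw [hmap_eq]
          apply ih
          · rw [hdist1, pvFoldlSet_length, hlen]
          · exact pvFoldlSet_ge ns dist d (by omega) hge
          · exact pvInsortAll_sorted ms t (List.pairwise_cons.mp hsort).2
          · -- pvInsortAll ms t ~ erase ++ ms
            have hp1 : (pvInsortAll ms t).Perm (ms ++ t) := pvInsortAll_perm ms t
            have hp2 : (ms ++ t).Perm (ms ++ (p0 :: ps).erase (h1, cur, ci)) :=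
              List.Perm.append_left ms hrest_perm
            have hp3 : (ms ++ (p0 :: ps).erase (h1, cur, ci)).Perm ((p0 :: ps).erase (h1, cur, ci) ++ ms) :=
              List.perm_append_comm
            rw [hrest]
            exact (hp1.trans hp2).trans hp3
          · intro it hit
            have hit' : it ∈ ms ++ t := (pvInsortAll_perm ms t).mem_iff.mp hit
            rcases List.mem_append.mp hit' with hit' | hit'
            · obtain ⟨z, hz, hzeq⟩ := List.mem_map.mp hit'
              have hzrange : z < nodes.length := List.mem_range.mp (List.mem_of_mem_filter hz)
              refine ⟨z, ?_, hzrange, ?_⟩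
              · rw [← hzeq]; rfl
              · rw [hdist1, pvFoldlSet_getD_mem ns dist d z hz (by omega)]
                omega
            · obtain ⟨n, hn1, hn2, hn3⟩ := hitems it (List.mem_cons_of_mem _ hit')
              refine ⟨n, hn1, hn2, ?_⟩
              by_cases hmem : n ∈ ns
              · rw [hdist1, pvFoldlSet_getD_mem ns dist d n hmem (by omega)]
                omega
              · rw [hdist1, pvFoldlSet_getD_not_mem ns dist d (-1) n hmem]
                exact hn3

lemma pvTop_eq (start end_ : String) (nodes : List String) (L : Nat) :
    (match PySem.List.index? nodes start with
     | none => (-1 : Int)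
     | some i => pvLoopA nodes L end_ (nodes.length + 1)
         ((List.replicate nodes.length (-1 : Int)).set i 0) [((0 : Int), start, (i : Int))]) =
    (match PySem.List.index? nodes start with
     | none => (-1 : Int)
     | some s => pvLoopB nodes L end_ (nodes.length + 1)
         ((List.replicate nodes.length (-1 : Int)).set s 0) [((0 : Int), start, (s : Int))]) := by
  cases hidx : PySem.List.index? nodes start with
  | none => rfl
  | some i =>
    obtain ⟨hk, -, -⟩ := PySem.List.getElem_of_index?_eq_some hidx
    apply pvLoop_eq
    · simp
    · intro v hv
      rcases List.mem_or_eq_of_mem_set hv with hv | hv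
      · rw [List.eq_of_mem_replicate hv]
      · rw [hv]; omega
    · exact List.pairwise_singleton _ _
    · exact List.Perm.refl _
    · intro it hit
      rcases List.mem_singleton.mp hit with rfl
      refine ⟨i, rfl, hk, ?_⟩
      rw [pvGetD_set_self _ _ _ _ (by simpa using hk)]

-- ===== VERDICT (by name: the statement is the Claim_ definition above) =====
theorem findMutationDistance_spec : Claim_equal_findMutationDistance := by
  intro start end_ bank _hdom
  unfold Spec_findMutationDistance findMutationDistance findMutationDistance_alt
  split_ifs with h1 h2 h3 <;> first
    | rfl
    | exact pvTop_eq start end_ _ _
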